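-- pv_equiv track=rewrite | github.com/HugeChaos/Impossible-differentials-and-impossible-polytopic-transitions | Gift64/Gift64_model.py | __sbox_operate1
-- ===== SOURCE A (Python) =====
-- sbox = [0x1, 0xa, 0x4, 0xc, 0x6, 0xf, 0x3, 0x9, 0x2, 0xd, 0xb, 0x7, 0x5, 0x0, 0x8, 0xe]
--
-- def __sbox_operate1(v1, v2):
--     var1 = "{}@{}@{}@{}".format(v1[3], v1[2], v1[1], v1[0])
--     var2 = "{}@{}@{}@{}".format(v2[3], v2[2], v2[1], v2[0])
--     statement1 = "0bin0001"
--     for i in range(1, 16):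
--         iv = "0bin"
--         for j in range(0, 4):
--             iv += "{}".format((i >> (3 - j)) & 0x1)
--         siv = "0bin"
--         for j in range(0, 4):
--             siv += "{}".format((sbox[i] >> (3 - j)) & 0x1)
--         statement1 = "(IF {} = {} THEN {} ELSE {} ENDIF)".format(var1, iv, siv, statement1)
--     statement = "ASSERT({} = {});\n".format(var2, statement1)
--     return statement
-- ===== SOURCE B (Python) =====
-- sbox = [0x1, 0xa, 0x4, 0xc, 0x6, 0xf, 0x3, 0x9, 0x2, 0xd, 0xb, 0x7, 0x5, 0x0, 0x8, 0xe]
--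
-- def __sbox_operate1(v1, v2):
--     var1 = "{}@{}@{}@{}".format(v1[3], v1[2], v1[1], v1[0])
--     var2 = "{}@{}@{}@{}".format(v2[3], v2[2], v2[1], v2[0])
--     prefixes = "".join(
--         "(IF {} = 0bin{:04b} THEN 0bin{:04b} ELSE ".format(var1, i, sbox[i])
--         for i in range(15, 0, -1)
--     )
--     statement1 = prefixes + "0bin0001" + " ENDIF)" * 15
--     return "ASSERT({} = {});\n".format(var2, statement1)
-- ===== Notes on version B (the rewrite author's own statement) =====
-- stated objective: alternative
-- what changed: Replaces the growing nested-accumulator loop (each iteration wraps the previous statement inside a new IF...ENDIF) by independently concatenating the 15 opening 'IF ... ELSE ' prefixes (built with a format '%04b' join over range(15,0,-1)), the innermost default '0bin0001', and ' ENDIF)'*15.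
import Mathlib
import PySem

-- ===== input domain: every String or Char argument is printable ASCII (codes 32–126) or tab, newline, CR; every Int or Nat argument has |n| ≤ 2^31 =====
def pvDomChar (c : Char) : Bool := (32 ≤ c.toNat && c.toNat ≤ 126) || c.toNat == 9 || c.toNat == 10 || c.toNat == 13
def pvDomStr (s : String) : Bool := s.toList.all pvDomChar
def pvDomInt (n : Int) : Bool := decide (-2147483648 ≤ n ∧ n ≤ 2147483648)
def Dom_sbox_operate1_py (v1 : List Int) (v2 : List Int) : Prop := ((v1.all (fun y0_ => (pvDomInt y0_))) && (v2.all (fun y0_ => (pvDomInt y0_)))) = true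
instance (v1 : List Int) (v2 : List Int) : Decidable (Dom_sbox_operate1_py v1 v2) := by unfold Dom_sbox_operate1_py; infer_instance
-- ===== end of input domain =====

-- B builds the same CVC assertion by concatenating prefixes + innermost default + closing tokens instead of A's growing nested accumulator (alternative decomposition, not faster).

-- ===== PORT A =====
def sboxA : List Int := [0x1, 0xa, 0x4, 0xc, 0x6, 0xf, 0x3, 0x9, 0x2, 0xd, 0xb, 0x7, 0x5, 0x0, 0x8, 0xe]

-- the loop-body bit expression (i >> (3 - j)) & 0x1
def bitA (n : Int) (j : Int) : Int := PySem.Int.band (n >>> (3 - j).toNat) 1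

-- "{}@{}@{}@{}".format(v[3], v[2], v[1], v[0]); Pre_ guarantees the four indices are in range
def fmtVarA (v : List Int) : String :=
  PySem.Int.toStr ((PySem.List.pyGet? v 3).getD 0) ++ "@" ++
  PySem.Int.toStr ((PySem.List.pyGet? v 2).getD 0) ++ "@" ++
  PySem.Int.toStr ((PySem.List.pyGet? v 1).getD 0) ++ "@" ++
  PySem.Int.toStr ((PySem.List.pyGet? v 0).getD 0)

def sbox_operate1_py (v1 : List Int) (v2 : List Int) : String :=
  let var1 := fmtVarA v1
  let var2 := fmtVarA v2
  let statement1 : String := "0bin0001"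
  let statement1 := (PySem.List.pyRange 1 16 1).foldl (fun st i =>
    let iv := (PySem.List.pyRange 0 4 1).foldl (fun iv j =>
      iv ++ PySem.Int.toStr (bitA i j)) "0bin"
    let siv := (PySem.List.pyRange 0 4 1).foldl (fun siv j =>
      siv ++ PySem.Int.toStr (bitA ((PySem.List.pyGet? sboxA i).getD 0) j)) "0bin"
    "(IF " ++ var1 ++ " = " ++ iv ++ " THEN " ++ siv ++ " ELSE " ++ st ++ " ENDIF)") statement1
  "ASSERT(" ++ var2 ++ " = " ++ statement1 ++ ");\n"

-- ===== PORT B =====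
def sboxB : List Int := [0x1, 0xa, 0x4, 0xc, 0x6, 0xf, 0x3, 0x9, 0x2, 0xd, 0xb, 0x7, 0x5, 0x0, 0x8, 0xe]

def fmtVarB (v : List Int) : String :=
  PySem.Int.toStr ((PySem.List.pyGet? v 3).getD 0) ++ "@" ++
  PySem.Int.toStr ((PySem.List.pyGet? v 2).getD 0) ++ "@" ++
  PySem.Int.toStr ((PySem.List.pyGet? v 1).getD 0) ++ "@" ++
  PySem.Int.toStr ((PySem.List.pyGet? v 0).getD 0)

-- port of "{:04b}" — exact for the nonnegative arguments it is applied to (0 ≤ n < 16)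
def pad4bin (n : Int) : String :=
  let ds := PySem.Int.toBinChars n
  String.ofList (List.replicate (4 - ds.length) '0' ++ ds)

def sbox_operate1_py_alt (v1 : List Int) (v2 : List Int) : String :=
  let var1 := fmtVarB v1
  let var2 := fmtVarB v2
  let prefixes := String.join ((PySem.List.pyRange 15 0 (-1)).map (fun i =>
    "(IF " ++ var1 ++ " = 0bin" ++ pad4bin i ++ " THEN 0bin" ++
      pad4bin ((PySem.List.pyGet? sboxB i).getD 0) ++ " ELSE "))
  let statement1 := prefixes ++ "0bin0001" ++ String.join (List.replicate 15 " ENDIF)")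
  "ASSERT(" ++ var2 ++ " = " ++ statement1 ++ ");\n"

-- ===== PRECONDITION & SPEC =====
-- A indexes v1[3] and v2[3]: Python raises IndexError on shorter lists
def Pre_sbox_operate1_py (v1 : List Int) (v2 : List Int) : Prop := 4 ≤ v1.length ∧ 4 ≤ v2.length
instance (v1 : List Int) (v2 : List Int) : Decidable (Pre_sbox_operate1_py v1 v2) := by unfold Pre_sbox_operate1_py; infer_instance
def pvWitness_sbox_operate1_py : List Int × List Int := ([0, 1, 2, 3], [4, 5, 6, 7])

def Spec_sbox_operate1_py (v1 : List Int) (v2 : List Int) (out : String) : Prop := out = sbox_operate1_py_alt v1 v2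
instance (v1 : List Int) (v2 : List Int) (out : String) : Decidable (Spec_sbox_operate1_py v1 v2 out) := by unfold Spec_sbox_operate1_py; infer_instance

-- ===== CLAIM (what is proved, stated in full; the proofs are below) =====
def Claim_equal_sbox_operate1_py : Prop := ∀ (v1 : List Int) (v2 : List Int), Dom_sbox_operate1_py v1 v2 → Pre_sbox_operate1_py v1 v2 → Spec_sbox_operate1_py v1 v2 (sbox_operate1_py v1 v2)

-- ===== LEMMAS AND PROOFS =====
-- both functions compute the same string once the two formatted variables are abstracted
theorem core_eq (a b : String) :
    (let statement1 : String := "0bin0001"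
     let statement1 := (PySem.List.pyRange 1 16 1).foldl (fun st i =>
       let iv := (PySem.List.pyRange 0 4 1).foldl (fun iv j =>
         iv ++ PySem.Int.toStr (bitA i j)) "0bin"
       let siv := (PySem.List.pyRange 0 4 1).foldl (fun siv j =>
         siv ++ PySem.Int.toStr (bitA ((PySem.List.pyGet? sboxA i).getD 0) j)) "0bin"
       "(IF " ++ a ++ " = " ++ iv ++ " THEN " ++ siv ++ " ELSE " ++ st ++ " ENDIF)") statement1
     "ASSERT(" ++ b ++ " = " ++ statement1 ++ ");\n")
    =
    (let prefixes := String.join ((PySem.List.pyRange 15 0 (-1)).map (fun i =>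
       "(IF " ++ a ++ " = 0bin" ++ pad4bin i ++ " THEN 0bin" ++
         pad4bin ((PySem.List.pyGet? sboxB i).getD 0) ++ " ELSE "))
     let statement1 := prefixes ++ "0bin0001" ++ String.join (List.replicate 15 " ENDIF)")
     "ASSERT(" ++ b ++ " = " ++ statement1 ++ ");\n") := by
  have e1 : PySem.List.pyRange 1 16 1 = [1,2,3,4,5,6,7,8,9,10,11,12,13,14,15] := by decide
  have e3 : PySem.List.pyRange 15 0 (-1) = [15,14,13,12,11,10,9,8,7,6,5,4,3,2,1] := by decide
  have hiv1 : (PySem.List.pyRange 0 4 1).foldl (fun iv j => iv ++ PySem.Int.toStr (bitA 1 j)) "0bin" = "0bin0001" := by decide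
  have hsiv1 : (PySem.List.pyRange 0 4 1).foldl (fun siv j => siv ++ PySem.Int.toStr (bitA ((PySem.List.pyGet? sboxA 1).getD 0) j)) "0bin" = "0bin1010" := by decide
  have hp1 : pad4bin 1 = "0001" := by decide
  have hq1 : pad4bin ((PySem.List.pyGet? sboxB 1).getD 0) = "1010" := by decide
  have hiv2 : (PySem.List.pyRange 0 4 1).foldl (fun iv j => iv ++ PySem.Int.toStr (bitA 2 j)) "0bin" = "0bin0010" := by decide
  have hsiv2 : (PySem.List.pyRange 0 4 1).foldl (fun siv j => siv ++ PySem.Int.toStr (bitA ((PySem.List.pyGet? sboxA 2).getD 0) j)) "0bin" = "0bin0100" := by decide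
  have hp2 : pad4bin 2 = "0010" := by decide
  have hq2 : pad4bin ((PySem.List.pyGet? sboxB 2).getD 0) = "0100" := by decide
  have hiv3 : (PySem.List.pyRange 0 4 1).foldl (fun iv j => iv ++ PySem.Int.toStr (bitA 3 j)) "0bin" = "0bin0011" := by decide
  have hsiv3 : (PySem.List.pyRange 0 4 1).foldl (fun siv j => siv ++ PySem.Int.toStr (bitA ((PySem.List.pyGet? sboxA 3).getD 0) j)) "0bin" = "0bin1100" := by decide
  have hp3 : pad4bin 3 = "0011" := by decide
  have hq3 : pad4bin ((PySem.List.pyGet? sboxB 3).getD 0) = "1100" := by decide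
  have hiv4 : (PySem.List.pyRange 0 4 1).foldl (fun iv j => iv ++ PySem.Int.toStr (bitA 4 j)) "0bin" = "0bin0100" := by decide
  have hsiv4 : (PySem.List.pyRange 0 4 1).foldl (fun siv j => siv ++ PySem.Int.toStr (bitA ((PySem.List.pyGet? sboxA 4).getD 0) j)) "0bin" = "0bin0110" := by decide
  have hp4 : pad4bin 4 = "0100" := by decide
  have hq4 : pad4bin ((PySem.List.pyGet? sboxB 4).getD 0) = "0110" := by decide
  have hiv5 : (PySem.List.pyRange 0 4 1).foldl (fun iv j => iv ++ PySem.Int.toStr (bitA 5 j)) "0bin" = "0bin0101" := by decide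
  have hsiv5 : (PySem.List.pyRange 0 4 1).foldl (fun siv j => siv ++ PySem.Int.toStr (bitA ((PySem.List.pyGet? sboxA 5).getD 0) j)) "0bin" = "0bin1111" := by decide
  have hp5 : pad4bin 5 = "0101" := by decide
  have hq5 : pad4bin ((PySem.List.pyGet? sboxB 5).getD 0) = "1111" := by decide
  have hiv6 : (PySem.List.pyRange 0 4 1).foldl (fun iv j => iv ++ PySem.Int.toStr (bitA 6 j)) "0bin" = "0bin0110" := by decide
  have hsiv6 : (PySem.List.pyRange 0 4 1).foldl (fun siv j => siv ++ PySem.Int.toStr (bitA ((PySem.List.pyGet? sboxA 6).getD 0) j)) "0bin" = "0bin0011" := by decide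
  have hp6 : pad4bin 6 = "0110" := by decide
  have hq6 : pad4bin ((PySem.List.pyGet? sboxB 6).getD 0) = "0011" := by decide
  have hiv7 : (PySem.List.pyRange 0 4 1).foldl (fun iv j => iv ++ PySem.Int.toStr (bitA 7 j)) "0bin" = "0bin0111" := by decide
  have hsiv7 : (PySem.List.pyRange 0 4 1).foldl (fun siv j => siv ++ PySem.Int.toStr (bitA ((PySem.List.pyGet? sboxA 7).getD 0) j)) "0bin" = "0bin1001" := by decide
  have hp7 : pad4bin 7 = "0111" := by decide
  have hq7 : pad4bin ((PySem.List.pyGet? sboxB 7).getD 0) = "1001" := by decide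
  have hiv8 : (PySem.List.pyRange 0 4 1).foldl (fun iv j => iv ++ PySem.Int.toStr (bitA 8 j)) "0bin" = "0bin1000" := by decide
  have hsiv8 : (PySem.List.pyRange 0 4 1).foldl (fun siv j => siv ++ PySem.Int.toStr (bitA ((PySem.List.pyGet? sboxA 8).getD 0) j)) "0bin" = "0bin0010" := by decide
  have hp8 : pad4bin 8 = "1000" := by decide
  have hq8 : pad4bin ((PySem.List.pyGet? sboxB 8).getD 0) = "0010" := by decide
  have hiv9 : (PySem.List.pyRange 0 4 1).foldl (fun iv j => iv ++ PySem.Int.toStr (bitA 9 j)) "0bin" = "0bin1001" := by decide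
  have hsiv9 : (PySem.List.pyRange 0 4 1).foldl (fun siv j => siv ++ PySem.Int.toStr (bitA ((PySem.List.pyGet? sboxA 9).getD 0) j)) "0bin" = "0bin1101" := by decide
  have hp9 : pad4bin 9 = "1001" := by decide
  have hq9 : pad4bin ((PySem.List.pyGet? sboxB 9).getD 0) = "1101" := by decide
  have hiv10 : (PySem.List.pyRange 0 4 1).foldl (fun iv j => iv ++ PySem.Int.toStr (bitA 10 j)) "0bin" = "0bin1010" := by decide
  have hsiv10 : (PySem.List.pyRange 0 4 1).foldl (fun siv j => siv ++ PySem.Int.toStr (bitA ((PySem.List.pyGet? sboxA 10).getD 0) j)) "0bin" = "0bin1011" := by decide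
  have hp10 : pad4bin 10 = "1010" := by decide
  have hq10 : pad4bin ((PySem.List.pyGet? sboxB 10).getD 0) = "1011" := by decide
  have hiv11 : (PySem.List.pyRange 0 4 1).foldl (fun iv j => iv ++ PySem.Int.toStr (bitA 11 j)) "0bin" = "0bin1011" := by decide
  have hsiv11 : (PySem.List.pyRange 0 4 1).foldl (fun siv j => siv ++ PySem.Int.toStr (bitA ((PySem.List.pyGet? sboxA 11).getD 0) j)) "0bin" = "0bin0111" := by decide
  have hp11 : pad4bin 11 = "1011" := by decide
  have hq11 : pad4bin ((PySem.List.pyGet? sboxB 11).getD 0) = "0111" := by decide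
  have hiv12 : (PySem.List.pyRange 0 4 1).foldl (fun iv j => iv ++ PySem.Int.toStr (bitA 12 j)) "0bin" = "0bin1100" := by decide
  have hsiv12 : (PySem.List.pyRange 0 4 1).foldl (fun siv j => siv ++ PySem.Int.toStr (bitA ((PySem.List.pyGet? sboxA 12).getD 0) j)) "0bin" = "0bin0101" := by decide
  have hp12 : pad4bin 12 = "1100" := by decide
  have hq12 : pad4bin ((PySem.List.pyGet? sboxB 12).getD 0) = "0101" := by decide
  have hiv13 : (PySem.List.pyRange 0 4 1).foldl (fun iv j => iv ++ PySem.Int.toStr (bitA 13 j)) "0bin" = "0bin1101" := by decide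
  have hsiv13 : (PySem.List.pyRange 0 4 1).foldl (fun siv j => siv ++ PySem.Int.toStr (bitA ((PySem.List.pyGet? sboxA 13).getD 0) j)) "0bin" = "0bin0000" := by decide
  have hp13 : pad4bin 13 = "1101" := by decide
  have hq13 : pad4bin ((PySem.List.pyGet? sboxB 13).getD 0) = "0000" := by decide
  have hiv14 : (PySem.List.pyRange 0 4 1).foldl (fun iv j => iv ++ PySem.Int.toStr (bitA 14 j)) "0bin" = "0bin1110" := by decide
  have hsiv14 : (PySem.List.pyRange 0 4 1).foldl (fun siv j => siv ++ PySem.Int.toStr (bitA ((PySem.List.pyGet? sboxA 14).getD 0) j)) "0bin" = "0bin1000" := by decide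
  have hp14 : pad4bin 14 = "1110" := by decide
  have hq14 : pad4bin ((PySem.List.pyGet? sboxB 14).getD 0) = "1000" := by decide
  have hiv15 : (PySem.List.pyRange 0 4 1).foldl (fun iv j => iv ++ PySem.Int.toStr (bitA 15 j)) "0bin" = "0bin1111" := by decide
  have hsiv15 : (PySem.List.pyRange 0 4 1).foldl (fun siv j => siv ++ PySem.Int.toStr (bitA ((PySem.List.pyGet? sboxA 15).getD 0) j)) "0bin" = "0bin1110" := by decide
  have hp15 : pad4bin 15 = "1111" := by decide
  have hq15 : pad4bin ((PySem.List.pyGet? sboxB 15).getD 0) = "1110" := by decide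
  simp only [e1, e3, List.foldl_cons, List.foldl_nil, List.map_cons, List.map_nil,
    hiv1, hsiv1, hp1, hq1, hiv2, hsiv2, hp2, hq2, hiv3, hsiv3, hp3, hq3, hiv4, hsiv4, hp4, hq4, hiv5, hsiv5, hp5, hq5, hiv6, hsiv6, hp6, hq6, hiv7, hsiv7, hp7, hq7, hiv8, hsiv8, hp8, hq8, hiv9, hsiv9, hp9, hq9, hiv10, hsiv10, hp10, hq10, hiv11, hsiv11, hp11, hq11, hiv12, hsiv12, hp12, hq12, hiv13, hsiv13, hp13, hq13, hiv14, hsiv14, hp14, hq14, hiv15, hsiv15, hp15, hq15]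
  simp [String.join, List.replicate, String.append_assoc]

-- ===== VERDICT (by name: the statement is the Claim_ definition above) =====
theorem sbox_operate1_py_spec : Claim_equal_sbox_operate1_py := by
  intro v1 v2 _ _
  unfold Spec_sbox_operate1_py sbox_operate1_py sbox_operate1_py_alt
  have h : fmtVarA = fmtVarB := rfl
  rw [h]
  exact core_eq (fmtVarB v1) (fmtVarB v2)
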